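-- pv_equiv track=rewrite | github.com/Krispy2009/advent-of-code-2024 | day9/part2.py | get_empties
-- ===== SOURCE A (Python) =====
-- def get_empties(disk_map):
--     empties = []
--     count = 0
--     for idx, i in enumerate(disk_map):
--         if i == '.':
--             count += 1
--         else:
--             # (start_idx, size)
--             if count > 0:
--                 empties.append((idx-count, count))
--             count = 0
--
--     return empties
-- ===== SOURCE B (Python) =====
-- def get_empties(disk_map):
--     # Gap-based: locate non-empty markers, emit the gap between consecutive markers.
--     positions = [i for i, c in enumerate(disk_map) if c != '.']
--     empties = []
--     prev = -1
--     for p in positions: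
--         gap = p - prev - 1
--         if gap > 0:
--             empties.append((prev + 1, gap))
--         prev = p
--     return empties
-- ===== Notes on version B (the rewrite author's own statement) =====
-- stated objective: alternative
-- what changed: Replaces the running dot-counter with a two-phase 'locate non-dot markers, then emit gaps between consecutive markers' decomposition.
import Mathlib
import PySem

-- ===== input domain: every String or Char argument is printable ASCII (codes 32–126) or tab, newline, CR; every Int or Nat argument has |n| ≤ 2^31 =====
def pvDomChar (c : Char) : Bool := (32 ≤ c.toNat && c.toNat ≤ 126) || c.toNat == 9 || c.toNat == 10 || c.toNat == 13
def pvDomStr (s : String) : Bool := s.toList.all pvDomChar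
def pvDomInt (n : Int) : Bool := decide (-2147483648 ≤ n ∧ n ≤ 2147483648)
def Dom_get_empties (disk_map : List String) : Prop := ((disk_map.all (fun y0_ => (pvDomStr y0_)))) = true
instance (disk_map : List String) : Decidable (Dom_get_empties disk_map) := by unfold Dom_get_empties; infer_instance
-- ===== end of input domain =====

-- B replaces A's running dot-counter with 'locate non-dot markers, then emit gaps
-- between consecutive markers' (alternative decomposition, same cost).

-- ===== PORT A =====
-- running state: (empties so far, current run length)
def get_empties (disk_map : List String) : List (Int × Int) :=
  ((PySem.List.enumerate disk_map).foldl
    (fun (st : List (Int × Int) × Int) (p : Int × String) =>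
      if p.2 == "." then (st.1, st.2 + 1)
      else ((if st.2 > 0 then st.1 ++ [(p.1 - st.2, st.2)] else st.1), 0))
    ([], 0)).1

-- ===== PORT B =====
def get_empties_alt (disk_map : List String) : List (Int × Int) :=
  let positions : List Int :=
    ((PySem.List.enumerate disk_map).filter (fun p => p.2 ≠ ".")).map (fun p => p.1)
  (positions.foldl
    (fun (st : Int × List (Int × Int)) (p : Int) =>
      let gap := p - st.1 - 1
      (p, if gap > 0 then st.2 ++ [(st.1 + 1, gap)] else st.2))
    (-1, [])).2

-- ===== PRECONDITION & SPEC =====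
def Spec_get_empties (disk_map : List String) (out : List (Int × Int)) : Prop := out = get_empties_alt disk_map
instance (disk_map : List String) (out : List (Int × Int)) : Decidable (Spec_get_empties disk_map out) := by unfold Spec_get_empties; infer_instance

-- ===== CLAIM (what is proved, stated in full; the proofs are below) =====
def Claim_equal_get_empties : Prop := ∀ (disk_map : List String), Dom_get_empties disk_map → Spec_get_empties disk_map (get_empties disk_map)

-- ===== LEMMAS AND PROOFS =====

theorem get_empties_fold_eq (l : List String) (s : Int) (acc : List (Int × Int)) (count : Int)
    (prev : Int) (hcp : prev = s - count - 1) (hc : 0 ≤ count) :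
    ((PySem.List.enumerate l s).foldl
      (fun (st : List (Int × Int) × Int) (p : Int × String) =>
        if p.2 == "." then (st.1, st.2 + 1)
        else ((if st.2 > 0 then st.1 ++ [(p.1 - st.2, st.2)] else st.1), 0))
      (acc, count)).1
    =
    ((((PySem.List.enumerate l s).filter (fun p => p.2 ≠ ".")).map (fun p => p.1)).foldl
      (fun (st : Int × List (Int × Int)) (p : Int) =>
        let gap := p - st.1 - 1
        (p, if gap > 0 then st.2 ++ [(st.1 + 1, gap)] else st.2))
      (prev, acc)).2 := by
  induction l generalizing s acc count prev with
  | nil => simp [PySem.List.enumerate_nil]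
  | cons x xs ih =>
    rw [PySem.List.enumerate_cons]
    by_cases hx : x = "."
    · have h := ih (s + 1) acc (count + 1) prev (by omega) (by omega)
      simpa [hx] using h
    · -- after a non-dot at index s the two emitted pairs coincide: s - count = prev + 1, count = s - prev - 1
      have h := ih (s + 1) (if count > 0 then acc ++ [(s - count, count)] else acc) 0 s (by omega) (by omega)
      simp only [List.foldl_cons, List.filter_cons, List.map_cons,
        show (x == ".") = false from beq_eq_false_iff_ne.mpr hx, Bool.false_eq_true,
        if_false, show (decide ¬(x = ".")) = true from by simp [hx], if_true]
      rw [h]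
      have hgap : s - prev - 1 = count := by omega
      have hstart : prev + 1 = s - count := by omega
      congr 2
      simp only [hgap, hstart]

-- ===== VERDICT (by name: the statement is the Claim_ definition above) =====
theorem get_empties_spec : Claim_equal_get_empties := by
  intro dm _
  unfold Spec_get_empties get_empties get_empties_alt
  exact get_empties_fold_eq dm 0 [] 0 (-1) (by omega) (by omega)
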